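-- pv_equiv track=rewrite | github.com/RatnakarVise/FSD_to_UDD_sec | app/docx_builder.py | find_all_table_like_chunks
-- ===== SOURCE A (Python) =====
-- def find_all_table_like_chunks(text):
--     if not text or not text.strip():
--         return []
--
--     lines = text.splitlines()
--     chunks = []
--
--     i = 0
--     while i < len(lines):
--         l = lines[i]
--
--         # TABLE
--         if l.count('|') >= 1 and (i + 1 < len(lines) and lines[i + 1].count('|') >= 1):
--             buf = [l]
--             i += 1
--             while i < len(lines) and lines[i].count('|') >= 1:
--                 buf.append(lines[i])
--                 i += 1
--             chunks.append(('table', "\n".join(buf).strip()))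
--             continue
--
--         # TEXT
--         if l.strip():
--             chunks.append(('text', l.strip()))
--
--         i += 1
--
--     return chunks
-- ===== SOURCE B (Python) =====
-- def find_all_table_like_chunks(text):
--     if not text or not text.strip():
--         return []
--     lines = text.splitlines()
--     n = len(lines)
--     pipe = [l.count('|') >= 1 for l in lines]
--     # a line belongs to a table iff it has a pipe and a neighbouring line has one too
--     mark = [pipe[i] and ((i > 0 and pipe[i - 1]) or (i + 1 < n and pipe[i + 1]))
--             for i in range(n)]
--     chunks = []
--     buf = []
--     for l, m in zip(lines, mark):
--         if m:
--             buf.append(l)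
--         else:
--             if buf:
--                 chunks.append(('table', "\n".join(buf).strip()))
--                 buf = []
--             if l.strip():
--                 chunks.append(('text', l.strip()))
--     if buf:
--         chunks.append(('table', "\n".join(buf).strip()))
--     return chunks
-- ===== Notes on version B (the rewrite author's own statement) =====
-- stated objective: alternative
-- what changed: B replaces A's run-scanning while loop (lookahead plus a nested pipe-collecting loop) by a staged labelling algorithm: it first computes a per-line table-membership mark from purely local neighbour information (pipe[i] and (pipe[i-1] or pipe[i+1])), then a flush-accumulator pass over (line, mark) pairs with no lookahead and no pipe tests.
import Mathlib
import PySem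

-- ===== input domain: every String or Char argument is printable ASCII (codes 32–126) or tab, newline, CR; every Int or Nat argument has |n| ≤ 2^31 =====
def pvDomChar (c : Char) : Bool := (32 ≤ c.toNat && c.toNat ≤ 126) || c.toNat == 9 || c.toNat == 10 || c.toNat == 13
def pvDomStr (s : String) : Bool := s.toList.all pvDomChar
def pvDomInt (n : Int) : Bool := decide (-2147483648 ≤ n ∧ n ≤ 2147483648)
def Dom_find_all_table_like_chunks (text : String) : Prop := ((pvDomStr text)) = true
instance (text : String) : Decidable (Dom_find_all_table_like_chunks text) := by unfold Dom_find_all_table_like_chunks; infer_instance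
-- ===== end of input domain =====

-- B replaces A's run-scanning loop (lookahead + nested pipe-collecting loop) by a staged
-- labelling algorithm: a per-line table-membership mark computed from local neighbour
-- information, then a flush-accumulator pass over (line, mark) pairs; same cost.

-- `l.count('|') >= 1` — the predicate both Pythons test on a line
def pvPipe (s : String) : Bool := decide (1 ≤ PySem.Str.count s "|")

-- ===== PORT A =====
-- inner `while i < len(lines) and lines[i].count('|') >= 1: buf.append(…); i += 1`:
-- returns (buf, remaining lines)
def pvCollect : List String → List String × List String
  | [] => ([], [])
  | x :: xs =>
    if pvPipe x then
      let r := pvCollect xs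
      (x :: r.1, r.2)
    else ([], x :: xs)

theorem pvCollect_snd_length : ∀ xs : List String, (pvCollect xs).2.length ≤ xs.length := by
  intro xs
  induction xs with
  | nil => simp [pvCollect]
  | cons x xs ih =>
    simp only [pvCollect]
    split
    · simpa using Nat.le_succ_of_le ih
    · simp

-- the outer `while i < len(lines)` loop, the index i replaced by the remaining suffix
def pvLoopA : List String → List (String × String)
  | [] => []
  | l :: rest =>
    if pvPipe l && (match rest with | r :: _ => pvPipe r | [] => false) then
      let br := pvCollect rest
      ("table", PySem.Str.strip (PySem.Str.join "\n" (l :: br.1))) :: pvLoopA br.2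
    else if PySem.Str.strip l ≠ "" then
      ("text", PySem.Str.strip l) :: pvLoopA rest
    else pvLoopA rest
termination_by xs => xs.length
decreasing_by
  · exact Nat.lt_succ_of_le (pvCollect_snd_length rest)
  · simp
  · simp

def find_all_table_like_chunks (text : String) : List (String × String) :=
  if text = "" ∨ PySem.Str.strip text = "" then []
  else pvLoopA (PySem.Str.splitlines text)

-- ===== PORT B =====
-- mark[i] = pipe[i] and ((i > 0 and pipe[i-1]) or (i+1 < n and pipe[i+1]))
def pvMarkIdx (pipe : List Bool) (n : Nat) (i : Nat) : Bool :=
  pipe.getD i false &&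
    ((decide (0 < i) && pipe.getD (i - 1) false) || (decide (i + 1 < n) && pipe.getD (i + 1) false))

-- the `for l, m in zip(lines, mark)` body, state = (chunks, buf)
def pvStepB (st : List (String × String) × List String) (p : String × Bool) :
    List (String × String) × List String :=
  if p.2 then (st.1, st.2 ++ [p.1])
  else
    let st1 := if st.2 ≠ [] then
        (st.1 ++ [("table", PySem.Str.strip (PySem.Str.join "\n" st.2))], ([] : List String))
      else st
    if PySem.Str.strip p.1 ≠ "" then (st1.1 ++ [("text", PySem.Str.strip p.1)], st1.2) else st1

-- the loop plus the trailing `if buf:` flush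
def pvRunB (xs : List (String × Bool)) (buf : List String) : List (String × String) :=
  let st := xs.foldl pvStepB ([], buf)
  if st.2 ≠ [] then st.1 ++ [("table", PySem.Str.strip (PySem.Str.join "\n" st.2))] else st.1

def find_all_table_like_chunks_alt (text : String) : List (String × String) :=
  if text = "" ∨ PySem.Str.strip text = "" then []
  else
    let lines := PySem.Str.splitlines text
    let n := lines.length
    let pipe := lines.map pvPipe
    let mark := (List.range n).map (pvMarkIdx pipe n)
    pvRunB (lines.zip mark) []

-- ===== PRECONDITION & SPEC =====
def Spec_find_all_table_like_chunks (text : String) (out : List (String × String)) : Prop := out = find_all_table_like_chunks_alt text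
instance (text : String) (out : List (String × String)) : Decidable (Spec_find_all_table_like_chunks text out) := by unfold Spec_find_all_table_like_chunks; infer_instance

-- ===== CLAIM (what is proved, stated in full; the proofs are below) =====
def Claim_equal_find_all_table_like_chunks : Prop := ∀ (text : String), Dom_find_all_table_like_chunks text → Spec_find_all_table_like_chunks text (find_all_table_like_chunks text)

-- ===== LEMMAS AND PROOFS =====

-- recursive characterisation of the mark list, threading the previous pipe flag
def pvMarkRec (prev : Bool) : List Bool → List Bool
  | [] => []
  | p :: ps => (p && (prev || ps.headD false)) :: pvMarkRec p ps

-- lines zipped with their marks, recursively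
def pvZM (prev : Bool) : List String → List (String × Bool)
  | [] => []
  | l :: rest =>
    (l, pvPipe l && (prev || (match rest with | r :: _ => pvPipe r | [] => false))) ::
      pvZM (pvPipe l) rest

theorem pvMarkRec_getD (ps : List Bool) : ∀ (prev : Bool) (i : Nat),
    (pvMarkRec prev ps).getD i false =
      (ps.getD i false &&
        ((if i = 0 then prev else ps.getD (i - 1) false) || ps.getD (i + 1) false)) := by
  induction ps with
  | nil => intro prev i; simp [pvMarkRec]
  | cons p ps ih =>
    intro prev i
    cases i with
    | zero =>
      simp [pvMarkRec]
      cases ps <;> simp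
    | succ i =>
      simp only [pvMarkRec, List.getD_cons_succ, ih p i]
      cases i with
      | zero => simp
      | succ j => simp

theorem pvMarkRec_length (ps : List Bool) : ∀ prev, (pvMarkRec prev ps).length = ps.length := by
  induction ps with
  | nil => intro _; rfl
  | cons p ps ih => intro prev; simp [pvMarkRec, ih]

theorem pvMark_eq_rec (pipe : List Bool) :
    (List.range pipe.length).map (pvMarkIdx pipe pipe.length) = pvMarkRec false pipe := by
  apply List.ext_getElem
  · simp [pvMarkRec_length]
  · intro i h1 h2
    simp only [List.getElem_map, List.getElem_range]
    have h2' : i < (pvMarkRec false pipe).length := h2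
    rw [show (pvMarkRec false pipe)[i] = (pvMarkRec false pipe).getD i false from
      (List.getD_eq_getElem _ _ h2').symm]
    rw [pvMarkRec_getD, pvMarkIdx]
    congr 1
    congr 1
    · cases i <;> simp
    · by_cases h : i + 1 < pipe.length
      · simp [h]
      · have : pipe.getD (i + 1) false = false := by
          rw [List.getD_eq_default]
          omega
        simp [h]

theorem pvZM_eq_zip (lines : List String) : ∀ prev,
    lines.zip (pvMarkRec prev (lines.map pvPipe)) = pvZM prev lines := by
  induction lines with
  | nil => intro _; rfl
  | cons l rest ih =>
    intro prev
    simp only [List.map_cons, pvMarkRec, List.zip_cons_cons, pvZM, ih]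
    congr 2
    cases rest <;> simp

-- the chunks accumulator only ever grows by appending: pull it out of the fold
theorem foldl_stepB_acc (xs : List (String × Bool)) : ∀ (c : List (String × String)) (b : List String),
    xs.foldl pvStepB (c, b) =
      (c ++ (xs.foldl pvStepB ([], b)).1, (xs.foldl pvStepB ([], b)).2) := by
  induction xs with
  | nil => intro c b; simp
  | cons x xs ih =>
    intro c b
    simp only [List.foldl_cons]
    have hstep : pvStepB (c, b) x =
        (c ++ (pvStepB ([], b) x).1, (pvStepB ([], b) x).2) := by
      obtain ⟨l, m⟩ := x
      simp only [pvStepB]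
      cases m <;> by_cases hb : b = [] <;> by_cases hl : PySem.Str.strip l = "" <;>
        simp [hb, hl]
    rw [hstep]
    obtain ⟨c', b'⟩ := pvStepB ([], b) x
    rw [ih (c ++ c') b', ih c' b']
    simp

theorem pvRunB_nil (buf : List String) :
    pvRunB [] buf =
      if buf ≠ [] then [("table", PySem.Str.strip (PySem.Str.join "\n" buf))] else [] := rfl

-- one loop iteration, expressed on the result of the whole run
theorem pvRunB_cons (l : String) (m : Bool) (xs : List (String × Bool)) (buf : List String) :
    pvRunB ((l, m) :: xs) buf =
      if m then pvRunB xs (buf ++ [l])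
      else
        (if buf ≠ [] then [("table", PySem.Str.strip (PySem.Str.join "\n" buf))] else []) ++
        (if PySem.Str.strip l ≠ "" then [("text", PySem.Str.strip l)] else []) ++
        pvRunB xs [] := by
  cases m with
  | true => simp [pvRunB, pvStepB]
  | false =>
    have hstep : pvStepB ([], buf) (l, false) =
        ((if buf ≠ [] then [("table", PySem.Str.strip (PySem.Str.join "\n" buf))] else []) ++
          (if PySem.Str.strip l ≠ "" then [("text", PySem.Str.strip l)] else []), []) := by
      simp only [pvStepB]
      by_cases hb : buf = [] <;> by_cases hl : PySem.Str.strip l = "" <;> simp [hb, hl]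
    show (let st := xs.foldl pvStepB (pvStepB ([], buf) (l, false));
      if st.2 ≠ [] then st.1 ++ [("table", PySem.Str.strip (PySem.Str.join "\n" st.2))] else st.1) = _
    rw [hstep, foldl_stepB_acc]
    simp only [pvRunB]
    split <;> simp_all

theorem pvCollect_eq (xs : List String) :
    pvCollect xs = (xs.takeWhile pvPipe, xs.dropWhile pvPipe) := by
  induction xs with
  | nil => rfl
  | cons x xs ih =>
    simp only [pvCollect, List.takeWhile, List.dropWhile]
    cases h : pvPipe x <;> simp [ih]

-- combined induction: Main (prev = false, empty buffer) and Sub (inside a table run)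
theorem pvB_eq_A : ∀ (n : Nat) (xs : List String), xs.length ≤ n →
    (pvRunB (pvZM false xs) [] = pvLoopA xs) ∧
    (∀ buf : List String, buf ≠ [] →
      pvRunB (pvZM true xs) buf =
        ("table", PySem.Str.strip (PySem.Str.join "\n" (buf ++ xs.takeWhile pvPipe))) ::
          pvLoopA (xs.dropWhile pvPipe)) := by
  intro n
  induction n with
  | zero =>
    intro xs hlen
    have hx : xs = [] := List.eq_nil_of_length_eq_zero (Nat.le_zero.mp hlen)
    subst hx
    exact ⟨by simp [pvZM, pvRunB, pvLoopA], fun buf hbuf => by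
      simp [pvZM, pvRunB_nil, pvLoopA, hbuf]⟩
  | succ n ih =>
    intro xs hlen
    cases xs with
    | nil =>
      exact ⟨by simp [pvZM, pvRunB, pvLoopA], fun buf hbuf => by
        simp [pvZM, pvRunB_nil, pvLoopA, hbuf]⟩
    | cons l rest =>
      simp only [List.length_cons, Nat.succ_le_succ_iff] at hlen
      constructor
      · -- Main: prev = false, buf = []
        cases hp : pvPipe l with
        | false =>
          have e1 : pvZM false (l :: rest) = (l, false) :: pvZM false rest := by
            simp [pvZM, hp]
          rw [e1, pvRunB_cons]
          conv_rhs => rw [pvLoopA.eq_def]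
          rw [(ih rest hlen).1]
          simp only [hp, Bool.false_and, Bool.false_eq_true, if_false]
          by_cases hl : PySem.Str.strip l = "" <;> simp [hl]
        | true =>
          cases rest with
          | nil =>
            have e1 : pvZM false [l] = [(l, false)] := by simp [pvZM, hp]
            rw [e1, pvRunB_cons]
            conv_rhs => rw [pvLoopA.eq_def]
            simp only [hp, Bool.and_false, Bool.false_eq_true, if_false, pvRunB_nil]
            by_cases hl : PySem.Str.strip l = "" <;> simp [hl, pvLoopA]
          | cons r rs =>
            cases hr : pvPipe r with
            | false =>
              have e1 : pvZM false (l :: r :: rs) = (l, false) :: pvZM true (r :: rs) := by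
                simp [pvZM, hp, hr]
              have e2 : pvZM true (r :: rs) = pvZM false (r :: rs) := by
                simp [pvZM, hr]
              rw [e1, e2, pvRunB_cons]
              conv_rhs => rw [pvLoopA.eq_def]
              rw [(ih _ hlen).1]
              simp only [hp, hr, Bool.and_false, Bool.false_eq_true, if_false]
              by_cases hl : PySem.Str.strip l = "" <;> simp [hl]
            | true =>
              have e1 : pvZM false (l :: r :: rs) = (l, true) :: pvZM true (r :: rs) := by
                simp [pvZM, hp, hr]
              rw [e1, pvRunB_cons, if_pos rfl,
                ((ih (r :: rs) hlen).2) ([] ++ [l]) (by simp)]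
              conv_rhs => rw [pvLoopA.eq_def]
              simp [hp, hr, pvCollect_eq]
      · -- Sub: prev = true, buf ≠ []
        intro buf hbuf
        cases hp : pvPipe l with
        | true =>
          have e1 : pvZM true (l :: rest) = (l, true) :: pvZM true rest := by
            simp [pvZM, hp]
          rw [e1, pvRunB_cons, if_pos rfl, ((ih rest hlen).2) (buf ++ [l]) (by simp)]
          simp [hp]
        | false =>
          have e1 : pvZM true (l :: rest) = (l, false) :: pvZM false rest := by
            simp [pvZM, hp]
          rw [e1, pvRunB_cons]
          simp only [List.takeWhile_cons, List.dropWhile_cons, hp, Bool.false_eq_true,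
            if_false]
          conv_rhs => rw [pvLoopA.eq_def]
          rw [(ih rest hlen).1]
          simp only [hp, Bool.false_and, Bool.false_eq_true, if_false]
          by_cases hl : PySem.Str.strip l = "" <;> simp [hl, hbuf]

-- ===== VERDICT (by name: the statement is the Claim_ definition above) =====
theorem find_all_table_like_chunks_spec : Claim_equal_find_all_table_like_chunks := by
  intro text _
  unfold Spec_find_all_table_like_chunks find_all_table_like_chunks find_all_table_like_chunks_alt
  split
  · rfl
  · simp only []
    have h1 : (List.range (PySem.Str.splitlines text).length).map
        (pvMarkIdx ((PySem.Str.splitlines text).map pvPipe) (PySem.Str.splitlines text).length)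
          = pvMarkRec false ((PySem.Str.splitlines text).map pvPipe) := by
      simpa using pvMark_eq_rec ((PySem.Str.splitlines text).map pvPipe)
    rw [h1, pvZM_eq_zip]
    exact ((pvB_eq_A (PySem.Str.splitlines text).length _ le_rfl).1).symm
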